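-- pv_equiv track=rewrite | github.com/SarathSrikakula/kite-callback | SingleCompanyAnalysis.py | group_coordinates
-- ===== SOURCE A (Python) =====
-- def group_coordinates(coords, threshold=10):
--     if not coords: return []
--     groups = []
--     current_group = [coords[0]]
--     for i in range(1, len(coords)):
--         if abs(coords[i][1] - coords[i - 1][1]) <= threshold:
--             current_group.append(coords[i])
--         else:
--             groups.append(current_group)
--             current_group = [coords[i]]
--     groups.append(current_group)
--     return groups
-- ===== SOURCE B (Python) =====
-- def group_coordinates(coords, threshold=10):
--     groups = []
--     for c in reversed(coords):
--         if groups and abs(groups[0][0][1] - c[1]) <= threshold: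
--             groups[0] = [c] + groups[0]
--         else:
--             groups = [[c]] + groups
--     return groups
-- ===== Notes on version B (the rewrite author's own statement) =====
-- stated objective: alternative
-- what changed: A scans left-to-right maintaining a current_group it flushes at each large y-jump; B folds right-to-left, prepending each coordinate to the first group when the y-difference to its head is within threshold, otherwise opening a new first group, so no pending group or flush exists.
import Mathlib
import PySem

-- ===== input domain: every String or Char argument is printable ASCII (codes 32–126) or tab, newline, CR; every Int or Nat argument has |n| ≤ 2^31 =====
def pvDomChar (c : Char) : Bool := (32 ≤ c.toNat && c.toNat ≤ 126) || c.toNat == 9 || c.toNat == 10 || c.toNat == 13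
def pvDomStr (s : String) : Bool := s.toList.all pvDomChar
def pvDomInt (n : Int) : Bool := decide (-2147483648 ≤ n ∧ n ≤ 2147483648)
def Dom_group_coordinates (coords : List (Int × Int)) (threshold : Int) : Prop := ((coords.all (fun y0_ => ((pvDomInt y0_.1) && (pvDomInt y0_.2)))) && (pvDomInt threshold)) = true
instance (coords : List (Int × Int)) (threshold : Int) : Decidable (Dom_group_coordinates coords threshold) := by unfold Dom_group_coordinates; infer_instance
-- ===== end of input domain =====

-- B replaces A's left-to-right maintain-and-flush scan by a right-to-left fold that
-- prepends each coordinate to the first group or opens a new one (objective: alternative).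

-- ===== PORT A =====
-- A's loop: state (groups, current_group), prev = coords[i-1]; branches in A's order.
def groupCoordsGoA (t : Int) (groups : List (List (Int × Int))) (cur : List (Int × Int))
    (prev : Int × Int) : List (Int × Int) → List (List (Int × Int))
  | [] => groups ++ [cur]
  | x :: xs =>
      if |x.2 - prev.2| ≤ t then groupCoordsGoA t groups (cur ++ [x]) x xs
      else groupCoordsGoA t (groups ++ [cur]) [x] x xs

def group_coordinates (coords : List (Int × Int)) (threshold : Int) : List (List (Int × Int)) :=
  match coords with
  | [] => []
  | c0 :: rest => groupCoordsGoA threshold [] [c0] c0 rest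

-- ===== PORT B =====
-- Source B's loop body: prepend c to the first group if close to its head, else open a new group.
def groupCoordsStepB (t : Int) (c : Int × Int) (acc : List (List (Int × Int))) :
    List (List (Int × Int)) :=
  match acc with
  | (h :: g) :: gs => if |h.2 - c.2| ≤ t then (c :: h :: g) :: gs else [c] :: (h :: g) :: gs
  | gs => [c] :: gs

def group_coordinates_alt (coords : List (Int × Int)) (threshold : Int) : List (List (Int × Int)) :=
  coords.foldr (groupCoordsStepB threshold) []

-- ===== PRECONDITION & SPEC =====
def Spec_group_coordinates (coords : List (Int × Int)) (threshold : Int) (out : List (List (Int × Int))) : Prop := out = group_coordinates_alt coords threshold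
instance (coords : List (Int × Int)) (threshold : Int) (out : List (List (Int × Int))) : Decidable (Spec_group_coordinates coords threshold out) := by unfold Spec_group_coordinates; infer_instance

-- ===== CLAIM (what is proved, stated in full; the proofs are below) =====
def Claim_equal_group_coordinates : Prop := ∀ (coords : List (Int × Int)) (threshold : Int), Dom_group_coordinates coords threshold → Spec_group_coordinates coords threshold (group_coordinates coords threshold)

-- ===== LEMMAS AND PROOFS =====

-- How B's fold result absorbs a pending group `cur` whose last scanned element was `prev`.
def groupCoordsGlue (t : Int) (cur : List (Int × Int)) (prev : Int × Int) :
    List (List (Int × Int)) → List (List (Int × Int))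
  | [] => [cur]
  | (h :: g) :: gs => if |h.2 - prev.2| ≤ t then (cur ++ h :: g) :: gs else cur :: (h :: g) :: gs
  | [] :: gs => cur :: [] :: gs   -- unreachable: fold groups are nonempty

theorem groupCoordsGoA_append (t : Int) (rest : List (Int × Int)) :
    ∀ (groups : List (List (Int × Int))) (cur : List (Int × Int)) (prev : Int × Int),
      groupCoordsGoA t groups cur prev rest = groups ++ groupCoordsGoA t [] cur prev rest := by
  induction rest with
  | nil => intro groups cur prev; simp [groupCoordsGoA]
  | cons x xs ih =>
      intro groups cur prev
      simp only [groupCoordsGoA]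
      split_ifs with h
      · rw [ih groups, ih []]
      · rw [ih (groups ++ [cur]), ih ([] ++ [cur])]; simp

theorem groupCoordsFoldr_head (t : Int) (x : Int × Int) (xs : List (Int × Int)) :
    ∃ g gs, List.foldr (groupCoordsStepB t) [] (x :: xs) = (x :: g) :: gs := by
  rw [List.foldr_cons]
  rcases hF : List.foldr (groupCoordsStepB t) [] xs with _ | ⟨g, gs⟩
  · exact ⟨[], [], rfl⟩
  · rcases g with _ | ⟨h, g'⟩
    · exact ⟨[], [] :: gs, rfl⟩
    · by_cases hc : |h.2 - x.2| ≤ t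
      · exact ⟨h :: g', gs, by simp [groupCoordsStepB, hc]⟩
      · exact ⟨[], (h :: g') :: gs, by simp [groupCoordsStepB, hc]⟩

theorem groupCoordsGoA_eq_glue (t : Int) (rest : List (Int × Int)) :
    ∀ (cur : List (Int × Int)) (prev : Int × Int),
      groupCoordsGoA t [] cur prev rest
        = groupCoordsGlue t cur prev (List.foldr (groupCoordsStepB t) [] rest) := by
  induction rest with
  | nil => intro cur prev; simp [groupCoordsGoA, groupCoordsGlue]
  | cons x xs ih =>
      intro cur prev
      simp only [groupCoordsGoA]
      rcases xs with _ | ⟨y, ys⟩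
      · -- xs = []
        split_ifs with h
        · simp [ih, groupCoordsGlue, groupCoordsStepB, h]
        · rw [groupCoordsGoA_append]
          simp [ih, groupCoordsGlue, groupCoordsStepB, h]
      · obtain ⟨g, gs, hF⟩ := groupCoordsFoldr_head t y ys
        have hF2 : List.foldr (groupCoordsStepB t) [] (x :: y :: ys)
            = groupCoordsStepB t x ((y :: g) :: gs) := by rw [List.foldr_cons, hF]
        split_ifs with h
        · rw [ih (cur ++ [x]) x, hF, hF2]
          by_cases hc : |y.2 - x.2| ≤ t <;>
            simp [groupCoordsGlue, groupCoordsStepB, hc, h]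
        · rw [groupCoordsGoA_append, ih [x] x, hF, hF2]
          by_cases hc : |y.2 - x.2| ≤ t <;>
            simp [groupCoordsGlue, groupCoordsStepB, hc, h]

-- ===== VERDICT (by name: the statement is the Claim_ definition above) =====
theorem group_coordinates_spec : Claim_equal_group_coordinates := by
  intro coords t _
  unfold Spec_group_coordinates group_coordinates group_coordinates_alt
  rcases coords with _ | ⟨c0, rest⟩
  · rfl
  · show groupCoordsGoA t [] [c0] c0 rest = _
    rw [groupCoordsGoA_eq_glue]
    rcases rest with _ | ⟨y, ys⟩
    · simp [groupCoordsGlue, groupCoordsStepB]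
    · obtain ⟨g, gs, hF⟩ := groupCoordsFoldr_head t y ys
      have hF2 : List.foldr (groupCoordsStepB t) [] (c0 :: y :: ys)
          = groupCoordsStepB t c0 ((y :: g) :: gs) := by rw [List.foldr_cons, hF]
      rw [hF, hF2]
      by_cases hc : |y.2 - c0.2| ≤ t <;> simp [groupCoordsGlue, groupCoordsStepB, hc]
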